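-- pv_equiv track=rewrite | github.com/youhavetopay/Algorithm | Programmers/연습문제/레벨 2/혼자서 하는 틱택토.py | count_board
-- ===== SOURCE A (Python) =====
-- def count_board(board):
--
--     o_count = 0
--     x_count = 0
--
--     for line in board:
--         for value in line:
--             if value == 'O':
--                 o_count += 1
--             elif value == 'X':
--                 x_count += 1
--
--     return [o_count, x_count]
-- ===== SOURCE B (Python) =====
-- def count_board(board):
--     return [sum(line.count('O') for line in board),
--             sum(line.count('X') for line in board)]
-- ===== Notes on version B (the rewrite author's own statement) =====
-- stated objective: idiomatic
-- what changed: B makes two staged per-line passes using the library count method and sums the per-line counts, eliminating A's per-character if/elif branching on two scalar counters.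
import Mathlib
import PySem

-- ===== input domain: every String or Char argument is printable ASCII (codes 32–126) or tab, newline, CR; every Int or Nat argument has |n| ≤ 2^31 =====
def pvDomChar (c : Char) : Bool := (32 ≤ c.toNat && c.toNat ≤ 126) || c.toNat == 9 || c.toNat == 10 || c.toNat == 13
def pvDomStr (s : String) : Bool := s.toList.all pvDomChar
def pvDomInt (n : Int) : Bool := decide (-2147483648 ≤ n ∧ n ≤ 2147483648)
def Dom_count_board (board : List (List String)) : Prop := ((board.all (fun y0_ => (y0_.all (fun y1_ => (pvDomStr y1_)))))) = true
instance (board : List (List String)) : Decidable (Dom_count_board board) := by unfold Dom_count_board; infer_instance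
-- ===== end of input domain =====

-- B replaces A's per-character if/elif with two staged passes summing library per-line counts (idiomatic; same cost).

-- ===== PORT A =====
def stepA (s : Int × Int) (value : String) : Int × Int :=
  if value == "O" then (s.1 + 1, s.2)
  else if value == "X" then (s.1, s.2 + 1)
  else s

def count_board (board : List (List String)) : List Int :=
  let p := board.foldl (fun (s : Int × Int) line => line.foldl stepA s) (0, 0)
  [p.1, p.2]

-- ===== PORT B =====
def count_board_alt (board : List (List String)) : List Int :=
  [((board.map (fun line => (PySem.List.count line "O" : Int))).sum),
   ((board.map (fun line => (PySem.List.count line "X" : Int))).sum)]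

-- ===== PRECONDITION & SPEC =====
def Spec_count_board (board : List (List String)) (out : List Int) : Prop := out = count_board_alt board
instance (board : List (List String)) (out : List Int) : Decidable (Spec_count_board board out) := by unfold Spec_count_board; infer_instance

-- ===== CLAIM (what is proved, stated in full; the proofs are below) =====
def Claim_equal_count_board : Prop := ∀ (board : List (List String)), Dom_count_board board → Spec_count_board board (count_board board)

-- ===== LEMMAS AND PROOFS =====
theorem countA_inner (line : List String) (o x : Int) :
    line.foldl stepA (o, x) = (o + line.count "O", x + line.count "X") := by
  induction line generalizing o x with
  | nil => simp
  | cons v rest ih =>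
    rw [List.foldl_cons]
    by_cases hO : v = "O"
    · subst hO
      rw [show stepA (o, x) "O" = (o + 1, x) from rfl, ih]
      simp only [List.count_cons, Prod.mk.injEq]
      constructor <;> push_cast <;> simp <;> omega
    · by_cases hX : v = "X"
      · subst hX
        rw [show stepA (o, x) "X" = (o, x + 1) from by simp [stepA, hO], ih]
        simp only [List.count_cons, Prod.mk.injEq]
        constructor <;> push_cast <;> simp [hO] <;> omega
      · rw [show stepA (o, x) v = (o, x) from by simp [stepA, hO, hX], ih]
        simp only [List.count_cons, Prod.mk.injEq]
        constructor <;> push_cast <;> simp [hO, hX]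

theorem countA_outer (board : List (List String)) (o x : Int) :
    board.foldl (fun (s : Int × Int) line => line.foldl stepA s) (o, x)
    = (o + ((board.map (fun line => (line.count "O" : Int))).sum),
       x + ((board.map (fun line => (line.count "X" : Int))).sum)) := by
  induction board generalizing o x with
  | nil => simp
  | cons line rest ih =>
    simp only [List.foldl_cons, countA_inner, ih, List.map_cons, List.sum_cons, Prod.mk.injEq]
    constructor <;> ring

-- ===== VERDICT (by name: the statement is the Claim_ definition above) =====
theorem count_board_spec : Claim_equal_count_board := by
  intro board _
  unfold Spec_count_board count_board count_board_alt
  simp only [countA_outer, PySem.List.count_eq, zero_add]
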